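-- pv_equiv track=rewrite | github.com/elements72/EDiReF-subtask-III | dataset.py | encode_utterance
-- ===== SOURCE A (Python) =====
-- def encode_utterance(t, dialogue, speakers, bert=False):
--     # Not used, tokenizer add it automatically
--     cls = "[CLS]" if bert else "<s>"
--     eos = "[EOS]" if bert else "</s>"
--     sep = "[SEP]" if bert else "</s>"
--
--     sequence = f"{sep} {speakers[t].upper()}: {dialogue[t]} {sep}"
--     for i in range(1, len(dialogue)):
--         # Append next utterance
--         if t+i < len(dialogue):
--             sequence = sequence + f" {speakers[t+i].upper()}: {dialogue[t+i]} "
--         # Append past utterance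
--         if t-i >= 0:
--             sequence = f" {speakers[t-i].upper()}: {dialogue[t-i]} " + sequence
--     sequence = sequence
--     return sequence
-- ===== SOURCE B (Python) =====
-- def encode_utterance(t, dialogue, speakers, bert=False):
--     sep = "[SEP]" if bert else "</s>"
--     center = f"{sep} {speakers[t].upper()}: {dialogue[t]} {sep}"
--     left = []
--     right = []
--     for j in range(len(dialogue)):
--         if j < t:
--             left.append(f" {speakers[j].upper()}: {dialogue[j]} ")
--         elif j > t:
--             right.append(f" {speakers[j].upper()}: {dialogue[j]} ")
--     return "".join(left) + center + "".join(right)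
-- ===== Notes on version B (the rewrite author's own statement) =====
-- stated objective: faster
-- what changed: Replaces the symmetric outward expand loop (prepend past / append future around t) with a precomputed center piece plus one forward sweep collecting left/right segment lists that are joined once at the end.
-- outside the precondition, e.g. on encode_utterance(-1, [''], ['x'], False): A returns '</s> X:  </s>', B returns '</s> X:  </s> X:  '
import Mathlib
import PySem

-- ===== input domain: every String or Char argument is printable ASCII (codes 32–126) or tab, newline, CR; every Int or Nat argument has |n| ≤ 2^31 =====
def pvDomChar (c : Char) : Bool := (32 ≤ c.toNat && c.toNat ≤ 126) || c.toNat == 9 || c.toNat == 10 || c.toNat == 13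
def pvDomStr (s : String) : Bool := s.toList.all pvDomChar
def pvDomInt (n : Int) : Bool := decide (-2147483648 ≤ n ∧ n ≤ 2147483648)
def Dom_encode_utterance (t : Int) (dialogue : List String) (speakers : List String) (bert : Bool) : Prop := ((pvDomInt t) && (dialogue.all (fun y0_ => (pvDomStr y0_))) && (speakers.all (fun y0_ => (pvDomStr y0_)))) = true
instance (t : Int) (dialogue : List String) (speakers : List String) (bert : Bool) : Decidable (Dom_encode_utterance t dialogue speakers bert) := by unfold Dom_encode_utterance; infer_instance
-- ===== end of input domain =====

-- B replaces A's symmetric expand-outward loop (prepend past / append future around t)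
-- with one forward sweep over all indices joined at the end; same return value on Pre_.

-- ===== PORT A =====
def encode_utterance (t : Int) (dialogue : List String) (speakers : List String) (bert : Bool) : String :=
  let _cls := if bert then "[CLS]" else "<s>"
  let _eos := if bert then "[EOS]" else "</s>"
  let sep := if bert then "[SEP]" else "</s>"
  let sequence := sep ++ " " ++ PySem.Str.upper (PySem.List.pyGetD speakers t "") ++ ": " ++ PySem.List.pyGetD dialogue t "" ++ " " ++ sep
  (PySem.List.pyRange 1 (dialogue.length : Int) 1).foldl (fun sequence i =>
    let sequence :=
      if t + i < (dialogue.length : Int) then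
        sequence ++ " " ++ PySem.Str.upper (PySem.List.pyGetD speakers (t + i) "") ++ ": " ++ PySem.List.pyGetD dialogue (t + i) "" ++ " "
      else sequence
    if 0 ≤ t - i then
      " " ++ PySem.Str.upper (PySem.List.pyGetD speakers (t - i) "") ++ ": " ++ PySem.List.pyGetD dialogue (t - i) "" ++ " " ++ sequence
    else sequence) sequence

-- ===== PORT B =====
def encode_utterance_alt (t : Int) (dialogue : List String) (speakers : List String) (bert : Bool) : String :=
  let sep := if bert then "[SEP]" else "</s>"
  let center := sep ++ " " ++ PySem.Str.upper (PySem.List.pyGetD speakers t "") ++ ": " ++ PySem.List.pyGetD dialogue t "" ++ " " ++ sep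
  let lr := (PySem.List.pyRange 0 (dialogue.length : Int) 1).foldl
    (fun (lr : List String × List String) j =>
      if j < t then
        (lr.1 ++ [" " ++ PySem.Str.upper (PySem.List.pyGetD speakers j "") ++ ": " ++ PySem.List.pyGetD dialogue j "" ++ " "], lr.2)
      else if t < j then
        (lr.1, lr.2 ++ [" " ++ PySem.Str.upper (PySem.List.pyGetD speakers j "") ++ ": " ++ PySem.List.pyGetD dialogue j "" ++ " "])
      else lr) ([], [])
  PySem.Str.join "" lr.1 ++ center ++ PySem.Str.join "" lr.2

-- ===== PRECONDITION & SPEC =====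
-- Pre_ excludes inputs where Python A raises IndexError (t out of range, or some speaker index
-- past len(speakers)), and additionally the negative t in [-len, 0) on which A returns only via
-- Python's negative-index wraparound — outside the function's natural domain of utterance indices.
def Pre_encode_utterance (t : Int) (dialogue : List String) (speakers : List String) (bert : Bool) : Prop :=
  0 ≤ t ∧ t < (dialogue.length : Int) ∧ dialogue.length ≤ speakers.length
instance (t : Int) (dialogue : List String) (speakers : List String) (bert : Bool) : Decidable (Pre_encode_utterance t dialogue speakers bert) := by unfold Pre_encode_utterance; infer_instance

def pvWitness_encode_utterance : Int × List String × List String × Bool := (1, ["hi", "yo"], ["a", "b"], false)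

def Spec_encode_utterance (t : Int) (dialogue : List String) (speakers : List String) (bert : Bool) (out : String) : Prop := out = encode_utterance_alt t dialogue speakers bert
instance (t : Int) (dialogue : List String) (speakers : List String) (bert : Bool) (out : String) : Decidable (Spec_encode_utterance t dialogue speakers bert out) := by unfold Spec_encode_utterance; infer_instance

-- ===== CLAIM (what is proved, stated in full; the proofs are below) =====
def Claim_equal_encode_utterance : Prop := ∀ (t : Int) (dialogue : List String) (speakers : List String) (bert : Bool), Dom_encode_utterance t dialogue speakers bert → Pre_encode_utterance t dialogue speakers bert → Spec_encode_utterance t dialogue speakers bert (encode_utterance t dialogue speakers bert)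

-- ===== LEMMAS AND PROOFS =====

-- the per-utterance segment " SPK: utt ", as a list of chars
def pvSeg (dialogue speakers : List String) (i : Int) : List Char :=
  (" " ++ PySem.Str.upper (PySem.List.pyGetD speakers i "") ++ ": " ++ PySem.List.pyGetD dialogue i "" ++ " ").toList

lemma join_empty_sep (l : List (List Char)) : PySem.Chars.join [] l = l.flatten := by
  induction l with
  | nil => rw [PySem.Chars.join_nil]; rfl
  | cons x xs ih =>
    cases xs with
    | nil => rw [PySem.Chars.join_singleton]; simp
    | cons y ys => rw [PySem.Chars.join_cons_cons, ih]; simp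

lemma range_split (n t0 : Nat) (h : t0 < n) :
    List.range n = List.range t0 ++ t0 :: List.range' (t0 + 1) (n - t0 - 1) := by
  rw [List.range_eq_range', show n = t0 + (1 + (n - t0 - 1)) by omega, ← List.range'_append]
  rw [List.range_eq_range', Nat.add_comm 1 (n - t0 - 1), List.range'_succ]
  simp

lemma foldl_toList (l : List Int) (stepS : String → Int → String) (stepL : List Char → Int → List Char)
    (h : ∀ s i, (stepS s i).toList = stepL s.toList i) (c : String) :
    (l.foldl stepS c).toList = l.foldl stepL c.toList := by
  induction l generalizing c with
  | nil => rfl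
  | cons x xs ih => simp only [List.foldl_cons, ih, h]

-- invariant of A's outward loop after k iterations (i = 1 .. k)
lemma loop_inv (g : Int → List Char) (c : List Char) (t0 n : Nat) (ht : t0 < n)
    (k : Nat) (hk : k ≤ n - 1) :
    ((List.range k).map (fun j => (1 : Int) + (j : Nat))).foldl
      (fun s i =>
        if 0 ≤ (t0 : Int) - i then
          g ((t0 : Int) - i) ++ (if (t0 : Int) + i < (n : Int) then s ++ g ((t0 : Int) + i) else s)
        else (if (t0 : Int) + i < (n : Int) then s ++ g ((t0 : Int) + i) else s)) c
    = (((List.range t0).drop (t0 - k)).map (fun j => g (j : Nat))).flatten ++ c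
      ++ (((List.range' (t0 + 1) (n - t0 - 1)).take k).map (fun j => g (j : Nat))).flatten := by
  induction k with
  | zero =>
    simp only [List.range_zero, List.map_nil, List.foldl_nil, Nat.sub_zero, List.take_zero]
    rw [List.drop_of_length_le (by simp)]
    simp
  | succ k ih =>
    have hk' : k ≤ n - 1 := by omega
    rw [List.range_succ, List.map_append, List.foldl_append, ih hk']
    simp only [List.map_cons, List.map_nil, List.foldl_cons, List.foldl_nil]
    have harith : ((1 : Int) + (k : Nat)) = ((k + 1 : Nat) : Int) := by push_cast; ring
    rw [harith]
    have hcast : (t0 : Int) + ((k + 1 : Nat) : Int) = ((t0 + 1 + k : Nat) : Int) := by push_cast; ring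
    have htakepos : t0 + (k + 1) < n → (List.range' (t0 + 1) (n - t0 - 1)).take (k + 1)
        = (List.range' (t0 + 1) (n - t0 - 1)).take k ++ [t0 + 1 + k] := by
      intro hR
      have hkR : k < (List.range' (t0 + 1) (n - t0 - 1)).length := by
        rw [List.length_range']; omega
      rw [List.take_add_one]
      congr 1
      rw [List.getElem?_eq_getElem hkR]
      simp
    have htakeneg : ¬ t0 + (k + 1) < n → (List.range' (t0 + 1) (n - t0 - 1)).take (k + 1)
        = (List.range' (t0 + 1) (n - t0 - 1)).take k := by
      intro hR
      have hlenR : (List.range' (t0 + 1) (n - t0 - 1)).length ≤ k := by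
        rw [List.length_range']; omega
      rw [List.take_of_length_le hlenR, List.take_of_length_le (le_trans hlenR (Nat.le_succ k))]
    have hdroppos : (k + 1 : Nat) ≤ t0 → (List.range t0).drop (t0 - (k + 1))
        = (t0 - (k + 1)) :: (List.range t0).drop (t0 - k) := by
      intro hL
      have hidx : t0 - (k + 1) < (List.range t0).length := by
        rw [List.length_range]; omega
      rw [List.drop_eq_getElem_cons hidx]
      congr 1
      · simp
      · congr 1; omega
    have hdropneg : ¬ (k + 1 : Nat) ≤ t0 → t0 - (k + 1) = t0 - k := by omega
    by_cases hR : t0 + (k + 1) < n <;> by_cases hL : (k + 1 : Nat) ≤ t0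
    · have hRi : (t0 : Int) + ((k + 1 : Nat) : Int) < (n : Int) := by push_cast; omega
      have hLi : (0 : Int) ≤ (t0 : Int) - ((k + 1 : Nat) : Int) := by push_cast; omega
      have hcastL : (t0 : Int) - ((k + 1 : Nat) : Int) = ((t0 - (k + 1) : Nat) : Int) := by
        push_cast [Nat.cast_sub hL]; ring
      rw [if_pos hRi, if_pos hLi, htakepos hR, hdroppos hL, hcastL, hcast]
      simp [List.append_assoc]
    · have hRi : (t0 : Int) + ((k + 1 : Nat) : Int) < (n : Int) := by push_cast; omega
      have hLi : ¬ (0 : Int) ≤ (t0 : Int) - ((k + 1 : Nat) : Int) := by push_cast; omega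
      rw [if_pos hRi, if_neg hLi, htakepos hR, hdropneg hL, hcast]
      simp [List.append_assoc]
    · have hRi : ¬ (t0 : Int) + ((k + 1 : Nat) : Int) < (n : Int) := by push_cast; omega
      have hLi : (0 : Int) ≤ (t0 : Int) - ((k + 1 : Nat) : Int) := by push_cast; omega
      have hcastL : (t0 : Int) - ((k + 1 : Nat) : Int) = ((t0 - (k + 1) : Nat) : Int) := by
        push_cast [Nat.cast_sub hL]; ring
      rw [if_neg hRi, if_pos hLi, htakeneg hR, hdroppos hL, hcastL]
      simp [List.append_assoc]
    · have hRi : ¬ (t0 : Int) + ((k + 1 : Nat) : Int) < (n : Int) := by push_cast; omega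
      have hLi : ¬ (0 : Int) ≤ (t0 : Int) - ((k + 1 : Nat) : Int) := by push_cast; omega
      rw [if_neg hRi, if_neg hLi, htakeneg hR, hdropneg hL]

lemma foldl_two_lists (l : List Int) (t : Int) (f : Int → String) (L R : List String) :
    l.foldl (fun (lr : List String × List String) j =>
      if j < t then (lr.1 ++ [f j], lr.2)
      else if t < j then (lr.1, lr.2 ++ [f j])
      else lr) (L, R)
    = (L ++ (l.filter (fun j => decide (j < t))).map f,
       R ++ (l.filter (fun j => decide (t < j))).map f) := by
  induction l generalizing L R with
  | nil => simp
  | cons x xs ih =>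
    by_cases h1 : x < t
    · have h2 : ¬ t < x := by omega
      simp [h1, h2, ih, List.append_assoc]
    · by_cases h2 : t < x
      · simp [h1, h2, ih, List.append_assoc]
      · simp [h1, h2, ih]

-- ===== VERDICT (by name: the statement is the Claim_ definition above) =====
set_option maxHeartbeats 1000000 in
theorem encode_utterance_spec : Claim_equal_encode_utterance := by
  intro t dialogue speakers bert _hdom hpre
  obtain ⟨ht0, htlt, _hsp⟩ := hpre
  unfold Spec_encode_utterance
  lift t to ℕ using ht0 with t0
  set n := dialogue.length with hn
  have htn : t0 < n := by exact_mod_cast htlt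
  apply String.toList_injective
  set g : Int → List Char := pvSeg dialogue speakers with hg
  set sep : String := if bert then "[SEP]" else "</s>" with hsep
  set c : List Char := (sep ++ " " ++ PySem.Str.upper (PySem.List.pyGetD speakers (t0 : Int) "") ++ ": " ++ PySem.List.pyGetD dialogue (t0 : Int) "" ++ " " ++ sep).toList with hc
  -- LHS: A's fold, pushed to List Char
  have hA : (encode_utterance (t0 : Int) dialogue speakers bert).toList
      = ((List.range t0).map (fun j => g (j : Nat))).flatten ++ c
        ++ ((List.range' (t0 + 1) (n - t0 - 1)).map (fun j => g (j : Nat))).flatten := by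
    unfold encode_utterance
    rw [PySem.List.pyRange_one]
    have hlen : (((n : Int)) - 1).toNat = n - 1 := by omega
    simp only [← hn, hlen, ← hsep]
    rw [foldl_toList _ _
      (fun s i =>
        if 0 ≤ (t0 : Int) - i then
          g ((t0 : Int) - i) ++ (if (t0 : Int) + i < (n : Int) then s ++ g ((t0 : Int) + i) else s)
        else (if (t0 : Int) + i < (n : Int) then s ++ g ((t0 : Int) + i) else s))
      (by
        intro s i
        dsimp only
        split_ifs <;> simp [hg, pvSeg])]
    rw [loop_inv g c t0 n htn (n - 1) le_rfl]
    have h0 : t0 - (n - 1) = 0 := by omega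
    rw [h0, List.drop_zero, List.take_of_length_le (by rw [List.length_range']; omega)]
  -- RHS: B's sweep, pushed to List Char
  have hjoin : ∀ (l : List String), (PySem.Str.join "" l).toList = (l.map String.toList).flatten := by
    intro l
    rw [PySem.Str.toList_join]
    have he : ("" : String).toList = ([] : List Char) := rfl
    rw [he, join_empty_sep]
  have hB : (encode_utterance_alt (t0 : Int) dialogue speakers bert).toList
      = ((List.range t0).map (fun j => g (j : Nat))).flatten ++ c
        ++ ((List.range' (t0 + 1) (n - t0 - 1)).map (fun j => g (j : Nat))).flatten := by
    unfold encode_utterance_alt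
    rw [PySem.List.pyRange_one]
    simp only [← hn, ← hsep]
    have hz : ((n : Int) - 0).toNat = n := by omega
    rw [hz]
    have hmapcast : (List.range n).map (fun k => (0 : Int) + (k : Nat)) = (List.range n).map (fun k => ((k : Nat) : Int)) := by
      apply List.map_congr_left; intro a _; ring
    rw [hmapcast, foldl_two_lists _ ((t0 : Nat) : Int)
      (fun j => " " ++ PySem.Str.upper (PySem.List.pyGetD speakers j "") ++ ": " ++ PySem.List.pyGetD dialogue j "" ++ " ") [] []]
    rw [range_split n t0 htn, List.map_append, List.map_cons, List.filter_append, List.filter_append,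
      List.filter_cons, List.filter_cons]
    have hLpart : ∀ (P : Int → Bool), (∀ a : Int, 0 ≤ a → a < ((t0 : Nat) : Int) → P a = true) →
        ((List.range t0).map (fun k => ((k : Nat) : Int))).filter P = (List.range t0).map (fun k => ((k : Nat) : Int)) := by
      intro P hP
      apply List.filter_eq_self.mpr
      intro a ha
      obtain ⟨k, hk, rfl⟩ := List.mem_map.mp ha
      exact hP _ (Int.natCast_nonneg k) (by exact_mod_cast List.mem_range.mp hk)
    have hLnil : ∀ (P : Int → Bool), (∀ a : Int, 0 ≤ a → a < ((t0 : Nat) : Int) → P a = false) →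
        ((List.range t0).map (fun k => ((k : Nat) : Int))).filter P = [] := by
      intro P hP
      rw [List.filter_eq_nil_iff]
      intro a ha
      obtain ⟨k, hk, rfl⟩ := List.mem_map.mp ha
      simp [hP _ (Int.natCast_nonneg k) (by exact_mod_cast List.mem_range.mp hk)]
    have hRmem : ∀ a ∈ (List.range' (t0 + 1) (n - t0 - 1)).map (fun k => ((k : Nat) : Int)),
        ((t0 : Nat) : Int) < a ∧ a < ((n : Nat) : Int) := by
      intro a ha
      obtain ⟨k, hk, rfl⟩ := List.mem_map.mp ha
      obtain ⟨i, hi, rfl⟩ := List.mem_range'.mp hk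
      constructor <;> [skip; skip] <;> push_cast <;> omega
    have hRpart : ∀ (P : Int → Bool), (∀ a : Int, ((t0 : Nat) : Int) < a → a < ((n : Nat) : Int) → P a = true) →
        ((List.range' (t0 + 1) (n - t0 - 1)).map (fun k => ((k : Nat) : Int))).filter P = (List.range' (t0 + 1) (n - t0 - 1)).map (fun k => ((k : Nat) : Int)) := by
      intro P hP
      apply List.filter_eq_self.mpr
      intro a ha
      exact hP _ (hRmem a ha).1 (hRmem a ha).2
    have hRnil : ∀ (P : Int → Bool), (∀ a : Int, ((t0 : Nat) : Int) < a → a < ((n : Nat) : Int) → P a = false) →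
        ((List.range' (t0 + 1) (n - t0 - 1)).map (fun k => ((k : Nat) : Int))).filter P = [] := by
      intro P hP
      rw [List.filter_eq_nil_iff]
      intro a ha
      simp [hP _ (hRmem a ha).1 (hRmem a ha).2]
    rw [hLpart (fun j => decide (j < ((t0 : Nat) : Int))) (by intro a h0 h1; simpa using h1),
      hLnil (fun j => decide (((t0 : Nat) : Int) < j)) (by intro a h0 h1; simp; omega),
      hRpart (fun j => decide (((t0 : Nat) : Int) < j)) (by intro a h0 h1; simpa using h0),
      hRnil (fun j => decide (j < ((t0 : Nat) : Int))) (by intro a h0 h1; simp; omega)]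
    have hmlt : decide (((t0 : Nat) : Int) < ((t0 : Nat) : Int)) = false := by simp
    rw [hmlt]
    simp only [Bool.false_eq_true, if_false, List.nil_append, List.append_nil]
    simp only [String.toList_append, hjoin, List.map_map]
    have hLmap : (List.range t0).map (String.toList ∘ (fun j => " " ++ PySem.Str.upper (PySem.List.pyGetD speakers j "") ++ ": " ++ PySem.List.pyGetD dialogue j "" ++ " ") ∘ (fun k => ((k : Nat) : Int)))
        = (List.range t0).map (fun j => g (j : Nat)) := by
      apply List.map_congr_left
      intro k _
      simp [hg, pvSeg]
    have hRmap : (List.range' (t0 + 1) (n - t0 - 1)).map (String.toList ∘ (fun j => " " ++ PySem.Str.upper (PySem.List.pyGetD speakers j "") ++ ": " ++ PySem.List.pyGetD dialogue j "" ++ " ") ∘ (fun k => ((k : Nat) : Int)))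
        = (List.range' (t0 + 1) (n - t0 - 1)).map (fun j => g (j : Nat)) := by
      apply List.map_congr_left
      intro k _
      simp [hg, pvSeg]
    rw [hLmap, hRmap]
    simp [hc, List.append_assoc]
  rw [hA, hB]
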